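-- pv_equiv track=rewrite | github.com/soBATnik/Python_CW | CW3.py | flick_switch
-- ===== SOURCE A (Python) =====
-- def flick_switch(list):
--     new_list = []
--     a = True
--     if a == True:
--         for i in range(len(list)):
--             if list[i] == 'flick':
--                 a = not a
--                 new_list.append(a)
--             else:
--                 new_list.append(a)
--     elif a == False:
--         for i in range(len(list)):
--             if list[i] == 'flick':
--                 a = not a
--                 new_list.append(a)
--             else:
--                 new_list.append(a)
--     return new_list
-- ===== SOURCE B (Python) =====
-- def flick_switch(list):
--     # Block construction: find the positions of every 'flick', then emit the
--     # output as constant runs between consecutive cut points, the k-th run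
--     # carrying the parity of k (runs alternate True/False starting at True).
--     cuts = [i for i, x in enumerate(list) if x == 'flick']
--     bounds = [0] + cuts + [len(list)]
--     out = []
--     for k, (lo, hi) in enumerate(zip(bounds, bounds[1:])):
--         out += [k % 2 == 0] * (hi - lo)
--     return out
-- ===== Notes on version B (the rewrite author's own statement) =====
-- stated objective: alternative
-- what changed: Replaces A's per-element toggled-boolean index loop (with a duplicated dead elif branch) by a block construction: collect the positions of every 'flick', form the bounds list [0]+cuts+[len], and emit constant runs of alternating parity between consecutive bounds.
import Mathlib
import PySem

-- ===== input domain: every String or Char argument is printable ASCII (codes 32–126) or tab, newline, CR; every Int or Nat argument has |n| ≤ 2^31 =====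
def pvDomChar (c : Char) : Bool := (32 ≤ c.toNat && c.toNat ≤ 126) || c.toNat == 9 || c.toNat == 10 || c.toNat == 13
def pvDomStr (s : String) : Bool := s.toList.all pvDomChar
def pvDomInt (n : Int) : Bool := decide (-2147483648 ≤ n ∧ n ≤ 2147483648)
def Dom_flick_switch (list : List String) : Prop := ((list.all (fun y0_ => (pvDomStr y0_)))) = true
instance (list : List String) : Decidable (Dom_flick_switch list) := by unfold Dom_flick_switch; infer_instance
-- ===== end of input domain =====

-- B replaces A's per-element toggled-boolean index loop (with its duplicated dead elif branch)
-- by a block construction: collect the positions of every 'flick', then emit constant runs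
-- between consecutive cut points, the k-th run carrying the parity of k. Objective: alternative.


-- ===== PORT A =====
-- literal port: dead 'elif' branch kept; list[i] with i ∈ range(len(list)) is always in range,
-- so pyGetD with a dummy default is exact here
def flick_switch (list : List String) : List Bool :=
  let new_list : List Bool := []
  let a : Bool := true
  if a == true then
    ((PySem.List.pyRange 0 (list.length : Int) 1).foldl
      (fun (st : Bool × List Bool) i =>
        if PySem.List.pyGetD list i "" == "flick" then
          ((!st.1), st.2 ++ [!st.1])
        else
          (st.1, st.2 ++ [st.1])) (a, new_list)).2
  else if a == false then
    ((PySem.List.pyRange 0 (list.length : Int) 1).foldl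
      (fun (st : Bool × List Bool) i =>
        if PySem.List.pyGetD list i "" == "flick" then
          ((!st.1), st.2 ++ [!st.1])
        else
          (st.1, st.2 ++ [st.1])) (a, new_list)).2
  else new_list

-- ===== PORT B =====
-- pass 1: cuts = positions of 'flick' (enumerate + filter);
-- pass 2: bounds = [0] + cuts + [len(list)], then for each consecutive pair (lo, hi)
-- (k-th pair, via enumerate(zip(bounds, bounds[1:]))) emit the run [k % 2 == 0] * (hi - lo)
def flick_switch_alt (list : List String) : List Bool :=
  let cuts : List Int :=
    (PySem.List.enumerate list).filterMap
      (fun p => if p.2 == "flick" then some p.1 else none)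
  let bounds : List Int := [0] ++ cuts ++ [(list.length : Int)]
  (PySem.List.enumerate (bounds.zip (PySem.List.slice bounds (some 1) none))).foldl
    (fun (out : List Bool) p =>
      out ++ List.replicate (p.2.2 - p.2.1).toNat (decide (PySem.Int.mod p.1 2 = 0))) []

-- ===== PRECONDITION & SPEC =====
def Spec_flick_switch (list : List String) (out : List Bool) : Prop := out = flick_switch_alt list
instance (list : List String) (out : List Bool) : Decidable (Spec_flick_switch list out) := by unfold Spec_flick_switch; infer_instance

-- ===== CLAIM (what is proved, stated in full; the proofs are below) =====
def Claim_equal_flick_switch : Prop := ∀ (list : List String), Dom_flick_switch list → Spec_flick_switch list (flick_switch list)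

-- ===== LEMMAS AND PROOFS =====

-- common reference point: the toggled-boolean sequence, element by element
def toggleSpec : List String → Bool → List Bool
  | [], _ => []
  | x :: t, a =>
    let a' := if x == "flick" then !a else a
    a' :: toggleSpec t a'

-- abstract form of B's second pass: runs between consecutive bounds, k-th run = parity of k
def blocks : Int → List Int → List Bool
  | k, b0 :: b1 :: rest =>
    List.replicate (b1 - b0).toNat (decide (PySem.Int.mod k 2 = 0)) ++ blocks (k + 1) (b1 :: rest)
  | _, _ => []

def cutsOf (l : List String) : List Int :=
  (PySem.List.enumerate l).filterMap (fun p => if p.2 == "flick" then some p.1 else none)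

theorem cuts_shift (t : List String) : ∀ s : Int,
    (PySem.List.enumerate t s).filterMap (fun p => if p.2 == "flick" then some p.1 else none)
    = (cutsOf t).map (· + s) := by
  induction t with
  | nil => intro s; simp [cutsOf, PySem.List.enumerate_nil]
  | cons x t ih =>
    intro s
    unfold cutsOf
    rw [PySem.List.enumerate_cons, PySem.List.enumerate_cons]
    simp only [List.filterMap_cons]
    by_cases h : (x == "flick") = true
    · simp only [h, if_true]
      rw [ih (s + 1), ih (0 + 1)]
      simp only [List.map_cons, List.map_map]
      congr 1
      · omega
      · congr 1; funext c; simp; omega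
    · simp only [h, Bool.false_eq_true, if_false]
      rw [ih (s + 1), ih (0 + 1)]
      rw [List.map_map]
      congr 1; funext c; simp; omega

theorem cutsOf_cons (x : String) (t : List String) :
    cutsOf (x :: t) = (if x == "flick" then [(0 : Int)] else []) ++ (cutsOf t).map (· + 1) := by
  unfold cutsOf
  rw [PySem.List.enumerate_cons]
  simp only [List.filterMap_cons]
  by_cases h : (x == "flick") = true
  · simp only [h, if_true, List.singleton_append]
    rw [cuts_shift t (0 + 1)]
    norm_num [cutsOf]
  · simp only [h, Bool.false_eq_true, if_false, List.nil_append]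
    rw [cuts_shift t (0 + 1)]
    norm_num [cutsOf]

theorem cuts_nonneg (l : List String) : ∀ c ∈ cutsOf l, 0 ≤ c := by
  intro c hc
  unfold cutsOf at hc
  rw [List.mem_filterMap] at hc
  obtain ⟨p, hp, hf⟩ := hc
  rw [PySem.List.mem_enumerate_iff] at hp
  obtain ⟨k, hk, rfl⟩ := hp
  by_cases h : (l[k] == "flick") = true
  · simp only [h, if_true, Option.some.injEq] at hf; omega
  · simp [h] at hf

theorem fold_blocks (bs : List Int) : ∀ (k : Int) (acc : List Bool),
    (PySem.List.enumerate (bs.zip bs.tail) k).foldl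
      (fun (out : List Bool) p =>
        out ++ List.replicate (p.2.2 - p.2.1).toNat (decide (PySem.Int.mod p.1 2 = 0))) acc
    = acc ++ blocks k bs := by
  induction bs with
  | nil => intro k acc; simp [blocks, PySem.List.enumerate_nil]
  | cons b0 t ih =>
    intro k acc
    cases t with
    | nil => simp [blocks, PySem.List.enumerate_nil]
    | cons b1 r =>
      simp only [List.tail_cons, List.zip_cons_cons]
      rw [PySem.List.enumerate_cons]
      simp only [List.foldl_cons]
      rw [show (b1 :: r).zip r = (b1 :: r).zip ((b1 :: r).tail) from rfl]
      rw [ih (k + 1)]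
      simp [blocks]

theorem parity_succ (k : Int) : decide (PySem.Int.mod (k + 1) 2 = 0) = !decide (PySem.Int.mod k 2 = 0) := by
  rw [PySem.Int.mod_eq_emod_of_pos (by norm_num), PySem.Int.mod_eq_emod_of_pos (by norm_num)]
  by_cases h : k % 2 = 0
  · simp [h]; omega
  · simp [h]; omega

theorem blocks_shift (bs : List Int) : ∀ (k d : Int), blocks k (bs.map (· + d)) = blocks k bs := by
  induction bs with
  | nil => intro k d; rfl
  | cons b0 t ih =>
    intro k d
    cases t with
    | nil => rfl
    | cons b1 r =>
      simp only [List.map_cons, blocks]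
      rw [show b1 + d - (b0 + d) = b1 - b0 by ring]
      rw [show (b1 + d) :: r.map (· + d) = ((b1 :: r).map (· + d)) from rfl, ih (k + 1) d]

theorem blocks_parity (bs : List Int) : ∀ k : Int, blocks (k + 1) bs = (blocks k bs).map (!·) := by
  induction bs with
  | nil => intro k; rfl
  | cons b0 t ih =>
    intro k
    cases t with
    | nil => rfl
    | cons b1 r =>
      simp only [blocks, List.map_append, List.map_replicate]
      rw [parity_succ, ih (k + 1)]

theorem blocks_head_lower (k b0 b1 : Int) (rest : List Int) (h : b0 ≤ b1) :
    blocks k ((b0 - 1) :: b1 :: rest)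
    = decide (PySem.Int.mod k 2 = 0) :: blocks k (b0 :: b1 :: rest) := by
  simp only [blocks]
  rw [show (b1 - (b0 - 1)).toNat = (b1 - b0).toNat + 1 by omega, List.replicate_succ]
  simp

theorem toggleSpec_not (t : List String) : ∀ a, toggleSpec t (!a) = (toggleSpec t a).map (!·) := by
  induction t with
  | nil => intro a; rfl
  | cons x t ih =>
    intro a
    by_cases h : (x == "flick") = true
    · simp only [toggleSpec, h, if_true, Bool.not_not, List.map_cons]
      simpa using ih (!a)
    · simp only [toggleSpec, h, Bool.false_eq_true, if_false, List.map_cons]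
      rw [ih a]

theorem alt_eq_blocks (l : List String) :
    flick_switch_alt l = blocks 0 ((0 : Int) :: cutsOf l ++ [(l.length : Int)]) := by
  have hs : ∀ bs : List Int, PySem.List.slice bs (some 1) none = bs.tail := by
    intro bs
    rw [← List.drop_one]
    simpa using PySem.List.slice_from_natCast bs 1
  show (PySem.List.enumerate
      ((([(0:Int)] ++ cutsOf l ++ [(l.length : Int)]).zip
        (PySem.List.slice ([(0:Int)] ++ cutsOf l ++ [(l.length : Int)]) (some 1) none)))).foldl
      (fun (out : List Bool) p =>
        out ++ List.replicate (p.2.2 - p.2.1).toNat (decide (PySem.Int.mod p.1 2 = 0))) []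
    = blocks 0 ((0 : Int) :: cutsOf l ++ [(l.length : Int)])
  rw [hs, fold_blocks]
  simp

theorem blocks_step (cs : List Int) (n k : Int) (hcs : ∀ c ∈ cs, 0 ≤ c) (hn : 0 ≤ n) :
    blocks k ((0 : Int) :: (cs ++ [n]).map (· + 1))
    = decide (PySem.Int.mod k 2 = 0) :: blocks k ((0 : Int) :: cs ++ [n]) := by
  cases cs with
  | nil =>
    simp only [List.nil_append, List.map_cons, List.map_nil]
    rw [show (0 : Int) = 1 - 1 from rfl, blocks_head_lower k 1 (n + 1) [] (by omega)]
    rw [show (1 : Int) :: [n + 1] = ([(0 : Int)] ++ [n]).map (· + 1) from by simp, blocks_shift]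
    simp
  | cons c0 cr =>
    have h0 : 0 ≤ c0 := hcs c0 (List.mem_cons_self)
    simp only [List.cons_append, List.map_cons]
    rw [show (0 : Int) = 1 - 1 from rfl, blocks_head_lower k 1 (c0 + 1) _ (by omega)]
    rw [show (1 : Int) :: (c0 + 1) :: (cr ++ [n]).map (· + 1)
        = (((0 : Int) :: c0 :: cr) ++ [n]).map (· + 1) from by simp, blocks_shift]
    simp

theorem blocks_toggle (l : List String) :
    blocks 0 ((0 : Int) :: cutsOf l ++ [(l.length : Int)]) = toggleSpec l true := by
  induction l with
  | nil => rfl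
  | cons x t ih =>
    have hcs := cuts_nonneg t
    have hn : (0 : Int) ≤ (t.length : Int) := by positivity
    rw [cutsOf_cons]
    by_cases h : (x == "flick") = true
    · rw [show (0 : Int) :: ((if (x == "flick") then [(0:Int)] else []) ++ (cutsOf t).map (· + 1)) ++ [((x :: t).length : Int)]
          = (0 : Int) :: (0 : Int) :: ((cutsOf t ++ [(t.length : Int)]).map (· + 1)) from by
        simp [h]]
      simp only [blocks]
      rw [blocks_step (cutsOf t) (t.length : Int) (0 + 1) hcs hn]
      rw [blocks_parity ((0 : Int) :: cutsOf t ++ [(t.length : Int)]) 0]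
      rw [ih]
      have ht := toggleSpec_not t true
      simp only [Bool.not_true] at ht
      simp [toggleSpec, h, ht]
    · rw [show (0 : Int) :: ((if (x == "flick") then [(0:Int)] else []) ++ (cutsOf t).map (· + 1)) ++ [((x :: t).length : Int)]
          = (0 : Int) :: ((cutsOf t ++ [(t.length : Int)]).map (· + 1)) from by
        simp [h]]
      rw [blocks_step (cutsOf t) (t.length : Int) 0 hcs hn]
      rw [ih]
      simp [toggleSpec, h]

theorem a_fold (l : List String) : ∀ (a : Bool) (acc : List Bool),
    (l.foldl
      (fun (st : Bool × List Bool) x =>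
        if x == "flick" then ((!st.1), st.2 ++ [!st.1]) else (st.1, st.2 ++ [st.1]))
      (a, acc)).2 = acc ++ toggleSpec l a := by
  induction l with
  | nil => intro a acc; simp [toggleSpec]
  | cons x t ih =>
    intro a acc
    by_cases h : (x == "flick") = true
    · simp only [List.foldl_cons, h, if_true]
      rw [ih (!a) (acc ++ [!a])]
      simp [toggleSpec, h]
    · simp only [List.foldl_cons, h, Bool.false_eq_true, if_false]
      rw [ih a (acc ++ [a])]
      simp [toggleSpec, h]

-- ===== VERDICT (by name: the statement is the Claim_ definition above) =====
theorem flick_switch_spec : Claim_equal_flick_switch := by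
  intro list _
  unfold Spec_flick_switch flick_switch
  simp only [beq_self_eq_true, if_true]
  rw [PySem.List.foldl_pyRange_zero_pyGetD' list ""
    (fun (st : Bool × List Bool) x =>
      if x == "flick" then ((!st.1), st.2 ++ [!st.1]) else (st.1, st.2 ++ [st.1]))
    (true, [])]
  rw [a_fold, alt_eq_blocks, blocks_toggle]
  simp
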